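-- pv_equiv track=rewrite | github.com/python/mypy | mypy/codec/tokenizer.py | get_end_pos
-- ===== SOURCE A (Python) =====
-- def get_end_pos(start_pos, tvalue):
--     row, col = start_pos
--     for c in tvalue:
--         if c == '\n':
--             col = 0
--             row += 1
--         else:
--             col += 1
--     return (row, col)
-- ===== SOURCE B (Python) =====
-- def get_end_pos(start_pos, tvalue):
--     row, col = start_pos
--     rows = tvalue.count('\n')
--     if rows == 0:
--         return (row, col + len(tvalue))
--     return (row + rows, len(tvalue) - tvalue.rfind('\n') - 1)
-- ===== Notes on version B (the rewrite author's own statement) =====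
-- stated objective: faster
-- what changed: Replaces the per-character loop with a closed-form computation: rows advance by tvalue.count('\n') and the column is read off the position of the last newline via rfind (or start_col + len when there is none).
import Mathlib
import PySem

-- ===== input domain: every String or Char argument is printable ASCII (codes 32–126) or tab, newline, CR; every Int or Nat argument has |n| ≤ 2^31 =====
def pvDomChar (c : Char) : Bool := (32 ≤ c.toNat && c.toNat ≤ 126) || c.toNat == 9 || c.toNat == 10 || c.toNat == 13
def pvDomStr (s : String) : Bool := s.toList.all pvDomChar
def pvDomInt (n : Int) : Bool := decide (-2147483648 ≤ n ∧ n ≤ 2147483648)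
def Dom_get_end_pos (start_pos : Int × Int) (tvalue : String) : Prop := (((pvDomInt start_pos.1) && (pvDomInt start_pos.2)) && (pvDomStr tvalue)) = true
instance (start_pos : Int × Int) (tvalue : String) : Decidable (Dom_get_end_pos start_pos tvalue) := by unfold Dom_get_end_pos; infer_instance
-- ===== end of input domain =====

-- B replaces A's per-character loop by a closed form from count('\n') and rfind('\n') (idiomatic; same behaviour).

-- ===== PORT A =====
-- the loop body: 'if c == "\n": col = 0; row += 1 else: col += 1'
def pvStepA (p : Int × Int) (c : Char) : Int × Int :=
  if c == '\n' then (p.1 + 1, 0) else (p.1, p.2 + 1)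

def get_end_pos (start_pos : Int × Int) (tvalue : String) : Int × Int :=
  tvalue.toList.foldl pvStepA start_pos

-- ===== PORT B =====
def get_end_pos_alt (start_pos : Int × Int) (tvalue : String) : Int × Int :=
  let row := start_pos.1
  let col := start_pos.2
  let rows : Int := (PySem.Str.count tvalue "\n" : Nat)
  if rows = 0 then (row, col + PySem.Str.len tvalue)
  else (row + rows, PySem.Str.len tvalue - PySem.Str.rfind tvalue "\n" - 1)

-- ===== PRECONDITION & SPEC =====
def Spec_get_end_pos (start_pos : Int × Int) (tvalue : String) (out : Int × Int) : Prop := out = get_end_pos_alt start_pos tvalue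
instance (start_pos : Int × Int) (tvalue : String) (out : Int × Int) : Decidable (Spec_get_end_pos start_pos tvalue out) := by unfold Spec_get_end_pos; infer_instance

-- ===== CLAIM (what is proved, stated in full; the proofs are below) =====
def Claim_equal_get_end_pos : Prop := ∀ (start_pos : Int × Int) (tvalue : String), Dom_get_end_pos start_pos tvalue → Spec_get_end_pos start_pos tvalue (get_end_pos start_pos tvalue)

-- ===== LEMMAS AND PROOFS =====

-- ===== VERDICT (by name: the statement is the Claim_ definition above) =====
-- count of a single-char needle is List.count
theorem pvCountGo (c : Char) : ∀ (l : List Char) (fuel acc : Nat), l.length ≤ fuel →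
    PySem.Chars.count.go [c] fuel l acc = acc + l.count c := by
  intro l
  induction l with
  | nil => intro fuel acc _; cases fuel <;> simp [PySem.Chars.count.go]
  | cons h t ih =>
    intro fuel acc hle
    cases fuel with
    | zero => simp at hle
    | succ f =>
      simp only [List.length_cons] at hle
      simp only [PySem.Chars.count.go, List.isPrefixOf]
      by_cases hc : c = h
      · subst hc
        simp only [BEq.rfl, Bool.true_and, if_true]
        simp only [List.length_cons, List.length_nil, List.drop_succ_cons, List.drop_zero]
        rw [ih f (acc + 1) (by omega)]
        simp
        omega
      · have : (c == h) = false := by simp [hc]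
        simp only [this, Bool.false_and]
        rw [ih f acc (by omega)]
        simp [Ne.symm hc]

theorem pvCountChar (c : Char) (l : List Char) :
    PySem.Chars.count l [c] = l.count c := by
  simp [PySem.Chars.count, List.isEmpty]
  simpa using pvCountGo c l l.length 0 le_rfl

-- rfind.go ignores a trailing non-needle character
theorem pvRfindGoApp (c nl : Char) (hc : c ≠ nl) (l : List Char) :
    ∀ j, j ≤ l.length → PySem.Chars.rfind.go (l ++ [c]) [nl] j = PySem.Chars.rfind.go l [nl] j := by
  intro j
  induction j with
  | zero =>
    intro _
    simp only [PySem.Chars.rfind.go]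
    cases l with
    | nil => simp [List.isPrefixOf, Ne.symm hc]
    | cons h t => simp
  | succ j ih =>
    intro hj
    simp only [PySem.Chars.rfind.go]
    have hd : List.drop (j + 1) (l ++ [c]) = List.drop (j + 1) l ++ [c] :=
      List.drop_append_of_le_length hj
    by_cases hjl : j + 1 = l.length
    · have : List.drop (j + 1) l = [] := by rw [List.drop_eq_nil_iff]; omega
      rw [hd, this]
      simp [List.isPrefixOf, Ne.symm hc, ih (by omega)]
    · have hlt : j + 1 < l.length := by omega
      rw [hd]
      rcases List.exists_cons_of_ne_nil (l := List.drop (j+1) l)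
        (by simp [List.drop_eq_nil_iff]; omega) with ⟨a, as, ha⟩
      rw [ha]
      simp [List.isPrefixOf, ih (by omega)]

theorem pvRfindApp (c nl : Char) (l : List Char) :
    PySem.Chars.rfind (l ++ [c]) [nl] =
      if c = nl then (l.length : Int) else PySem.Chars.rfind l [nl] := by
  simp only [PySem.Chars.rfind, List.length_append, List.length_cons, List.length_nil]
  have h1 : PySem.Chars.rfind.go (l ++ [c]) [nl] (l.length + 1) =
      PySem.Chars.rfind.go (l ++ [c]) [nl] l.length := by
    simp only [PySem.Chars.rfind.go]
    have : List.drop (l.length + 1) (l ++ [c]) = [] := by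
      rw [List.drop_eq_nil_iff]; simp
    rw [this]; simp [List.isPrefixOf]
  rw [h1]
  by_cases hc : c = nl
  · subst hc
    cases l with
    | nil => simp [PySem.Chars.rfind.go, List.isPrefixOf]
    | cons h t =>
      simp only [PySem.Chars.rfind.go, List.length_cons]
      have : List.drop (t.length + 1) ((h :: t) ++ [c]) = [c] := by
        rw [List.drop_append_of_le_length (by simp)]
        simp
      rw [this]
      simp [List.isPrefixOf]
  · rw [pvRfindGoApp c nl hc l l.length le_rfl]
    simp [hc]

-- the characterization of A's fold, proved back to front
theorem pvMain (l : List Char) (row col : Int) :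
    l.foldl pvStepA (row, col) =
      ((row + l.count '\n' : Int),
       if l.count '\n' = 0 then col + l.length
       else (l.length : Int) - PySem.Chars.rfind l ['\n'] - 1) := by
  induction l using List.reverseRecOn with
  | nil => simp
  | append_singleton l c ih =>
    rw [List.foldl_append, ih]
    simp only [List.foldl_cons, List.foldl_nil, pvStepA, List.count_append,
      List.length_append, pvRfindApp c '\n' l]
    by_cases hc : c = '\n'
    · subst hc
      simp
      ring
    · have hb : (c == Char.ofNat 10) = false := by
        simpa using hc
      simp only [hb, List.length_cons, List.length_nil]
      by_cases h0 : l.count (Char.ofNat 10) = 0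
      · simp [h0, hc]
        ring
      · simp [h0, hc]
        ring

theorem get_end_pos_spec : Claim_equal_get_end_pos := by
  intro start_pos tvalue _
  unfold Spec_get_end_pos get_end_pos get_end_pos_alt
  rw [(rfl : start_pos = (start_pos.1, start_pos.2)), pvMain]
  simp only [PySem.Str.count_eq, PySem.Str.rfind_eq, PySem.Str.len_eq]
  have hnl : ("\n" : String).toList = ['\n'] := rfl
  by_cases h0 : tvalue.toList.count '\n' = 0 <;>
    simp [hnl, pvCountChar, h0]
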